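-- pv_equiv track=rewrite | github.com/marceloarantes19/ia2024 | buscaLocal/Mochila/subidaDeEncosta.py | melhorVizinho
-- ===== SOURCE A (Python) =====
-- def geraValor(p, v, m, C):
--     pa = 0
--     va = 0
--     n = len(p)
--     for i in range(0, n):
--         pa = pa+p[i]*m[i]
--         va = va+v[i]*m[i]
--     return va if pa <= C else -1
--
-- def melhorVizinho(p, v, m, C):
--     n = len(p)
--     novaMochila = []
--     melhorMochila = []
--     valorDaMochila = geraValor(p, v, m, C)
--     for j in range(0, n):
--         melhorMochila.append(m[j])
--     valorDaMM = valorDaMochila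
--     for i in range(0, n):
--         novaMochila = []
--         for j in range(0, n):
--             novaMochila.append(m[j])
--         novaMochila[i] = 0 if m[i]==1 else 1
--         novoValor = geraValor(p,v,novaMochila,C)
--         if novoValor > valorDaMM:
--             valorDaMM = novoValor
--             melhorMochila = []
--             for j in range(0, n):
--                 melhorMochila.append(novaMochila[j])
--     return melhorMochila, valorDaMM
-- ===== SOURCE B (Python) =====
-- def melhorVizinho(p, v, m, C):
--     # Compute base weight/value once; each single-item flip is evaluated in O(1)
--     # by an incremental delta instead of rebuilding the knapsack and rescanning it.
--     n = len(p)
--     base = m[:n]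
--     pa = sum(pi * mi for pi, mi in zip(p, base))
--     va = sum(vi * mi for vi, mi in zip(v, base))
--     best_val = va if pa <= C else -1
--     best_i = None
--     for i in range(n):
--         d = (0 if m[i] == 1 else 1) - m[i]
--         npa = pa + p[i] * d
--         nval = va + v[i] * d if npa <= C else -1
--         if nval > best_val:
--             best_val = nval
--             best_i = i
--     if best_i is None:
--         return base, best_val
--     best = base.copy()
--     best[best_i] = 0 if m[best_i] == 1 else 1
--     return best, best_val
-- ===== Notes on version B (the rewrite author's own statement) =====
-- stated objective: faster
-- what changed: B computes the base knapsack weight/value once and evaluates every single-item flip with an O(1) incremental delta (tracking only the best flip index), instead of A's rebuilding each neighbor list and rescanning all n items per flip.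
import Mathlib
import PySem

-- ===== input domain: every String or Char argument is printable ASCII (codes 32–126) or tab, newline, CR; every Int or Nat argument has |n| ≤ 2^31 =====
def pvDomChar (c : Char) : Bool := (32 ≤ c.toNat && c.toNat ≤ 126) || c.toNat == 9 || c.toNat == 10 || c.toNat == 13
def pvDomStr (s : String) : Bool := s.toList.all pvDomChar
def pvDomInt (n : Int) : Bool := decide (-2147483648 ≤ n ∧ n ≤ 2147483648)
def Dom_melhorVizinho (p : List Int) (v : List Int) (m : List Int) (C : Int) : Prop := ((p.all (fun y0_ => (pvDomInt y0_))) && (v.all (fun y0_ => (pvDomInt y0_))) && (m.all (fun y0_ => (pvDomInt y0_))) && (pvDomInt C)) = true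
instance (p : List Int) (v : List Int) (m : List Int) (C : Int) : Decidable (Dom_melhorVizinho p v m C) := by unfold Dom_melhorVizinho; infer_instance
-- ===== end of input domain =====

-- B replaces A's quadratic rebuild-and-rescan of every single-item flip by one base
-- weight/value pass plus an O(1) incremental delta per flip (objective: faster, asymptotic).

-- ===== PORT A =====
-- literal port of geraValor: one loop accumulating (pa, va), then the capacity check
def geraValor (p : List Int) (v : List Int) (m : List Int) (C : Int) : Int :=
  let n := p.length
  let s := (List.range n).foldl
    (fun (s : Int × Int) i =>
      (s.1 + p.getD i 0 * m.getD i 0, s.2 + v.getD i 0 * m.getD i 0)) ((0 : Int), (0 : Int))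
  if s.1 ≤ C then s.2 else -1

-- p[i]/v[i]/m[i] are ported as .getD i 0: Pre_ keeps every index in range (Python raises outside)
def melhorVizinho (p : List Int) (v : List Int) (m : List Int) (C : Int) : List Int × Int :=
  let n := p.length
  let valorDaMochila := geraValor p v m C
  let melhorMochila := (List.range n).map (fun j => m.getD j 0)
  (List.range n).foldl
    (fun (s : List Int × Int) i =>
      let novaMochila := ((List.range n).map (fun j => m.getD j 0)).set i
        (if m.getD i 0 = 1 then 0 else 1)
      let novoValor := geraValor p v novaMochila C
      if novoValor > s.2 then (novaMochila, novoValor) else s)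
    (melhorMochila, valorDaMochila)

-- ===== PORT B =====
def melhorVizinho_alt (p : List Int) (v : List Int) (m : List Int) (C : Int) : List Int × Int :=
  let n := p.length
  let base := m.take n
  let pa := ((p.zip base).map (fun q => q.1 * q.2)).sum
  let va := ((v.zip base).map (fun q => q.1 * q.2)).sum
  let baseVal := if pa ≤ C then va else -1
  let r := (List.range n).foldl
    (fun (s : Int × Option Nat) i =>
      let d := (if m.getD i 0 = 1 then (0 : Int) else 1) - m.getD i 0
      let npa := pa + p.getD i 0 * d
      let nval := if npa ≤ C then va + v.getD i 0 * d else -1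
      if nval > s.1 then (nval, some i) else s)
    (baseVal, none)
  match r.2 with
  | none => (base, r.1)
  | some k => (base.set k (if m.getD k 0 = 1 then 0 else 1), r.1)

-- ===== PRECONDITION & SPEC =====
-- Pre_ excludes exactly the inputs where A raises IndexError: v or m shorter than p.
def Pre_melhorVizinho (p : List Int) (v : List Int) (m : List Int) (C : Int) : Prop :=
  p.length ≤ v.length ∧ p.length ≤ m.length
instance (p : List Int) (v : List Int) (m : List Int) (C : Int) : Decidable (Pre_melhorVizinho p v m C) := by unfold Pre_melhorVizinho; infer_instance

def pvWitness_melhorVizinho : List Int × List Int × List Int × Int := ([2, 3], [3, 4], [1, 0], 5)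

def Spec_melhorVizinho (p : List Int) (v : List Int) (m : List Int) (C : Int) (out : List Int × Int) : Prop := out = melhorVizinho_alt p v m C
instance (p : List Int) (v : List Int) (m : List Int) (C : Int) (out : List Int × Int) : Decidable (Spec_melhorVizinho p v m C out) := by unfold Spec_melhorVizinho; infer_instance

-- ===== CLAIM (what is proved, stated in full; the proofs are below) =====
def Claim_equal_melhorVizinho : Prop := ∀ (p : List Int) (v : List Int) (m : List Int) (C : Int), Dom_melhorVizinho p v m C → Pre_melhorVizinho p v m C → Spec_melhorVizinho p v m C (melhorVizinho p v m C)

-- ===== LEMMAS AND PROOFS =====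

theorem pv_pairfold (l : List Nat) (f g : Nat → Int) (a b : Int) :
    l.foldl (fun (s : Int × Int) i => (s.1 + f i, s.2 + g i)) (a, b)
      = (a + (l.map f).sum, b + (l.map g).sum) := by
  induction l generalizing a b with
  | nil => simp
  | cons x xs ih => simp [ih, add_assoc]

theorem pv_sum_congr (n : Nat) (f g : Nat → Int) (h : ∀ j < n, f j = g j) :
    ((List.range n).map f).sum = ((List.range n).map g).sum := by
  rw [List.map_congr_left]
  intro j hj
  exact h j (List.mem_range.mp hj)

theorem pv_zip_sum (x y : List Int) (n : Nat) (hy : y.length = n) (hx : n ≤ x.length) :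
    ((x.zip y).map (fun q => q.1 * q.2)).sum
      = ((List.range n).map (fun j => x.getD j 0 * y.getD j 0)).sum := by
  congr 1
  apply List.ext_getElem
  · simp [hy]; omega
  · intro j h1 h2
    have hjn : j < n := by simp at h2; omega
    have hjx : j < x.length := lt_of_lt_of_le hjn hx
    have hjy : j < y.length := by omega
    simp [List.getElem_zip, List.getD_eq_getElem?_getD, List.getElem?_eq_getElem hjx,
      List.getElem?_eq_getElem hjy]

theorem pv_take_eq_map_range (m : List Int) (n : Nat) (h : n ≤ m.length) :
    m.take n = (List.range n).map (fun j => m.getD j 0) := by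
  apply List.ext_getElem
  · simp; omega
  · intro j h1 h2
    have hjn : j < n := by simp at h1; omega
    have hjm : j < m.length := lt_of_lt_of_le hjn h
    simp [List.getD_eq_getElem?_getD, List.getElem?_eq_getElem hjm]

theorem pv_sum_update (n i : Nat) (f : Nat → Int) (c : Int) (hi : i < n) :
    ((List.range n).map (fun j => if j = i then c else f j)).sum
      = ((List.range n).map f).sum + (c - f i) := by
  induction n with
  | zero => omega
  | succ n ih =>
    rw [List.range_succ, List.map_append, List.map_append, List.sum_append, List.sum_append]
    by_cases h : i = n
    · subst h
      have : ((List.range i).map (fun j => if j = i then c else f j)).sum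
          = ((List.range i).map f).sum := by
        apply pv_sum_congr
        intro j hj
        simp [Nat.ne_of_lt hj]
      simp [this]
    · have hi' : i < n := by omega
      rw [ih hi']
      simp [show n ≠ i from fun hh => h hh.symm]
      ring

-- geraValor of the base knapsack
theorem pv_geraValor_base (p v m : List Int) (C : Int) :
    geraValor p v m C
      = (if ((List.range p.length).map (fun j => p.getD j 0 * m.getD j 0)).sum ≤ C
         then ((List.range p.length).map (fun j => v.getD j 0 * m.getD j 0)).sum else -1) := by
  simp only [geraValor]
  rw [pv_pairfold]
  simp

-- geraValor of a single-item flip, incrementally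
theorem pv_geraValor_flip (p v m : List Int) (C : Int) (i : Nat) (c : Int)
    (hv : p.length ≤ v.length) (hm : p.length ≤ m.length) (hi : i < p.length) :
    geraValor p v (((List.range p.length).map (fun j => m.getD j 0)).set i c) C
      = (if ((List.range p.length).map (fun j => p.getD j 0 * m.getD j 0)).sum
              + p.getD i 0 * (c - m.getD i 0) ≤ C
         then ((List.range p.length).map (fun j => v.getD j 0 * m.getD j 0)).sum
              + v.getD i 0 * (c - m.getD i 0) else -1) := by
  set n := p.length with hn
  set nova := ((List.range n).map (fun j => m.getD j 0)).set i c with hnova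
  have hlen : nova.length = n := by simp [hnova]
  have hkey : ∀ j < n, nova.getD j 0 = if j = i then c else m.getD j 0 := by
    intro j hj
    rw [hnova]
    by_cases h : j = i
    · subst h
      simp [List.getD_eq_getElem?_getD, hj]
    · rw [List.getD_eq_getElem?_getD, List.getElem?_set_ne (fun hh => h hh.symm)]
      simp [List.getD_eq_getElem?_getD, hj, h]
  rw [pv_geraValor_base]
  have hp : ((List.range n).map (fun j => p.getD j 0 * nova.getD j 0)).sum
      = ((List.range n).map (fun j => p.getD j 0 * m.getD j 0)).sum + p.getD i 0 * (c - m.getD i 0) := by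
    rw [pv_sum_congr n _ (fun j => if j = i then p.getD i 0 * c else p.getD j 0 * m.getD j 0)
      (by intro j hj
          rw [hkey j hj]
          by_cases h : j = i
          · subst h; simp
          · simp [h])]
    have := pv_sum_update n i (fun j => p.getD j 0 * m.getD j 0) (p.getD i 0 * c) hi
    simp only [this]
    ring
  have hv' : ((List.range n).map (fun j => v.getD j 0 * nova.getD j 0)).sum
      = ((List.range n).map (fun j => v.getD j 0 * m.getD j 0)).sum + v.getD i 0 * (c - m.getD i 0) := by
    rw [pv_sum_congr n _ (fun j => if j = i then v.getD i 0 * c else v.getD j 0 * m.getD j 0)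
      (by intro j hj
          rw [hkey j hj]
          by_cases h : j = i
          · subst h; simp
          · simp [h])]
    have := pv_sum_update n i (fun j => v.getD j 0 * m.getD j 0) (v.getD i 0 * c) hi
    simp only [this]
    ring
  rw [hn] at hp hv' ⊢
  rw [hp, hv']

-- the loop invariant: A's (list, best) state is the image of B's (best, index) state
theorem pv_loop (p v m : List Int) (C : Int)
    (hv : p.length ≤ v.length) (hm : p.length ≤ m.length)
    (pa va : Int)
    (hpa : pa = ((List.range p.length).map (fun j => p.getD j 0 * m.getD j 0)).sum)
    (hva : va = ((List.range p.length).map (fun j => v.getD j 0 * m.getD j 0)).sum)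
    (l : List Nat) (hl : ∀ i ∈ l, i < p.length) (bv : Int) (o : Option Nat) :
    l.foldl
      (fun (s : List Int × Int) i =>
        let novaMochila := ((List.range p.length).map (fun j => m.getD j 0)).set i
          (if m.getD i 0 = 1 then 0 else 1)
        let novoValor := geraValor p v novaMochila C
        if novoValor > s.2 then (novaMochila, novoValor) else s)
      ((match o with
        | none => (List.range p.length).map (fun j => m.getD j 0)
        | some k => ((List.range p.length).map (fun j => m.getD j 0)).set k
            (if m.getD k 0 = 1 then 0 else 1)), bv)
      = (let r := l.foldl
          (fun (s : Int × Option Nat) i =>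
            let d := (if m.getD i 0 = 1 then (0 : Int) else 1) - m.getD i 0
            let npa := pa + p.getD i 0 * d
            let nval := if npa ≤ C then va + v.getD i 0 * d else -1
            if nval > s.1 then (nval, some i) else s)
          (bv, o);
        match r.2 with
        | none => ((List.range p.length).map (fun j => m.getD j 0), r.1)
        | some k => (((List.range p.length).map (fun j => m.getD j 0)).set k
            (if m.getD k 0 = 1 then 0 else 1), r.1)) := by
  induction l generalizing bv o with
  | nil => cases o <;> simp
  | cons i t ih =>
    have hi : i < p.length := hl i (List.mem_cons_self ..)
    have hl' : ∀ j ∈ t, j < p.length := fun j hj => hl j (List.mem_cons_of_mem _ hj)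
    simp only [List.foldl_cons]
    have hval : geraValor p v (((List.range p.length).map (fun j => m.getD j 0)).set i
          (if m.getD i 0 = 1 then 0 else 1)) C
        = (if pa + p.getD i 0 * ((if m.getD i 0 = 1 then (0 : Int) else 1) - m.getD i 0) ≤ C
           then va + v.getD i 0 * ((if m.getD i 0 = 1 then (0 : Int) else 1) - m.getD i 0) else -1) := by
      rw [pv_geraValor_flip p v m C i _ hv hm hi, hpa, hva]
    simp only [hval]
    by_cases hgt : (if pa + p.getD i 0 * ((if m.getD i 0 = 1 then (0 : Int) else 1) - m.getD i 0) ≤ C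
           then va + v.getD i 0 * ((if m.getD i 0 = 1 then (0 : Int) else 1) - m.getD i 0) else -1) > bv
    · simp only [if_pos hgt]
      exact ih hl' _ (some i)
    · simp only [if_neg hgt]
      exact ih hl' bv o

-- ===== VERDICT (by name: the statement is the Claim_ definition above) =====
theorem melhorVizinho_spec : Claim_equal_melhorVizinho := by
  intro p v m C _hdom hpre
  obtain ⟨hv, hm⟩ := hpre
  unfold Spec_melhorVizinho melhorVizinho melhorVizinho_alt
  have htake : m.take p.length = (List.range p.length).map (fun j => m.getD j 0) :=
    pv_take_eq_map_range m p.length hm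
  have hpa : ((p.zip (m.take p.length)).map (fun q => q.1 * q.2)).sum
      = ((List.range p.length).map (fun j => p.getD j 0 * m.getD j 0)).sum := by
    rw [pv_zip_sum p (m.take p.length) p.length (by simp; omega) le_rfl]
    apply pv_sum_congr
    intro j hj
    rw [htake]
    have : j < ((List.range p.length).map (fun j => m.getD j 0)).length := by simpa using hj
    simp [List.getD_eq_getElem?_getD, hj,
      List.getElem?_eq_getElem (lt_of_lt_of_le hj hm)]
  have hva : ((v.zip (m.take p.length)).map (fun q => q.1 * q.2)).sum
      = ((List.range p.length).map (fun j => v.getD j 0 * m.getD j 0)).sum := by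
    rw [pv_zip_sum v (m.take p.length) p.length (by simp; omega) hv]
    apply pv_sum_congr
    intro j hj
    rw [htake]
    have : j < ((List.range p.length).map (fun j => m.getD j 0)).length := by simpa using hj
    simp [List.getD_eq_getElem?_getD, hj,
      List.getElem?_eq_getElem (lt_of_lt_of_le hj hm)]
  have hbase : geraValor p v m C
      = (if ((p.zip (m.take p.length)).map (fun q => q.1 * q.2)).sum ≤ C
         then ((v.zip (m.take p.length)).map (fun q => q.1 * q.2)).sum else -1) := by
    rw [pv_geraValor_base, hpa, hva]
  simp only [hbase, hpa, hva]
  simp only [htake]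
  have := pv_loop p v m C hv hm _ _ rfl rfl (List.range p.length)
    (fun i hi => List.mem_range.mp hi)
    (if ((List.range p.length).map (fun j => p.getD j 0 * m.getD j 0)).sum ≤ C
     then ((List.range p.length).map (fun j => v.getD j 0 * m.getD j 0)).sum else -1) none
  simpa using this
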